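-- pv_equiv track=rewrite | github.com/lesleytomosada/codewars | python/6 kyu/2023-07-17_+1_array.py | up_array1
-- ===== SOURCE A (Python) =====
-- def up_array1(arr):
--     if not arr or min(arr) < 0 or max(arr) > 9:
--         return None
--
--     for i in range(len(arr) - 1, -1, -1):
--         arr[i] += 1
--         if arr[i] < 10:
--             return arr
--         else:
--             arr[i] = 0
--
--     return [1] + arr
-- ===== SOURCE B (Python) =====
-- def up_array1(arr):
--     if not arr or any(d < 0 or d > 9 for d in arr):
--         return None
--     n = 0
--     for d in arr:
--         n = n * 10 + d
--     n += 1
--     digits = []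
--     m = n
--     while m > 0:
--         digits.append(m % 10)
--         m //= 10
--     digits.reverse()
--     if len(digits) <= len(arr):
--         arr[:] = [0] * (len(arr) - len(digits)) + digits
--         return arr
--     else:
--         arr[:] = [0] * len(arr)
--         return [1] + arr
-- ===== Notes on version B (the rewrite author's own statement) =====
-- stated objective: alternative
-- what changed: Replaced A's right-to-left in-place carry loop by converting the digit list to an integer, adding one, and converting back to digits with zero left-padding (overflow detected by the digit count growing); the arithmetic path avoids A's per-index loop bookkeeping.
import Mathlib
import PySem

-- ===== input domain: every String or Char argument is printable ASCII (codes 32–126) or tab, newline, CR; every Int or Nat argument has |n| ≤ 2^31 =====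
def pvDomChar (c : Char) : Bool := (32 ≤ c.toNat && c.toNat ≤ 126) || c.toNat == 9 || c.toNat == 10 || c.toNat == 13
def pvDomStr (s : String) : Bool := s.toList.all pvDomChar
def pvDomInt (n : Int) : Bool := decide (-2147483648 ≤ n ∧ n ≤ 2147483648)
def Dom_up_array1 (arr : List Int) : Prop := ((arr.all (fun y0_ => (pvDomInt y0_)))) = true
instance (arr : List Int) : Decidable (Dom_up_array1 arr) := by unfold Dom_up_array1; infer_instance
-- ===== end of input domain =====

-- B replaces A's right-to-left carry loop by convert-to-integer, add one, convert back
-- with zero padding (objective: alternative algorithm, same cost). Both A and B mutate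
-- the Python argument in place identically; the Lean equivalence is about return values.

-- ===== PORT A =====
-- A's carry loop: i counts remaining indices (i = Python index + 1); early return on carry < 10.
def up_array1_go : List Int → Nat → List Int
  | arr, 0 => 1 :: arr
  | arr, i + 1 =>
      let v := arr.getD i 0 + 1
      if v < 10 then arr.set i v
      else up_array1_go (arr.set i 0) i

def up_array1 (arr : List Int) : Option (List Int) :=
  if arr = [] then none
  else if (PySem.List.min? arr (fun x => x)).getD 0 < 0 ∨
          (PySem.List.max? arr (fun x => x)).getD 0 > 9 then none
  else some (up_array1_go arr arr.length)

-- ===== PORT B =====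
-- digits of m in base 10, least significant first (Source B's while loop before the reverse)
def bDigitsRev (m : Int) : List Int :=
  if _h : m ≤ 0 then []
  else PySem.Int.mod m 10 :: bDigitsRev (PySem.Int.floordiv m 10)
termination_by m.toNat
decreasing_by
  have h10 : (0:Int) < 10 := by norm_num
  rw [PySem.Int.floordiv_eq_ediv_of_pos h10]
  omega

def up_array1_alt (arr : List Int) : Option (List Int) :=
  if arr = [] ∨ arr.any (fun d => decide (d < 0) || decide (d > 9)) then none
  else
    let n := arr.foldl (fun acc d => acc * 10 + d) 0
    let digits := (bDigitsRev (n + 1)).reverse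
    if digits.length ≤ arr.length then
      some (List.replicate (arr.length - digits.length) 0 ++ digits)
    else
      some (1 :: List.replicate arr.length 0)

-- ===== PRECONDITION & SPEC =====
def Spec_up_array1 (arr : List Int) (out : Option (List Int)) : Prop := out = up_array1_alt arr
instance (arr : List Int) (out : Option (List Int)) : Decidable (Spec_up_array1 arr out) := by unfold Spec_up_array1; infer_instance

-- ===== CLAIM (what is proved, stated in full; the proofs are below) =====
def Claim_equal_up_array1 : Prop := ∀ (arr : List Int), Dom_up_array1 arr → Spec_up_array1 arr (up_array1 arr)

-- ===== LEMMAS AND PROOFS =====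

-- value of a least-significant-first digit list
def valR : List Int → Int
  | [] => 0
  | d :: ds => d + 10 * valR ds

-- increment of a least-significant-first digit list
def incR : List Int → List Int
  | [] => [1]
  | d :: ds => if d + 1 < 10 then (d + 1) :: ds else 0 :: incR ds

theorem up_array1_go_eq (xs ys : List Int) :
    up_array1_go (xs ++ ys) xs.length = (incR xs.reverse).reverse ++ ys := by
  induction xs using List.reverseRecOn generalizing ys with
  | nil => simp [up_array1_go, incR]
  | append_singleton zs d ih =>
      have hlen : (zs ++ [d]).length = zs.length + 1 := by simp
      rw [hlen]
      have hget : ((zs ++ [d]) ++ ys).getD zs.length 0 = d := by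
        rw [List.append_assoc, List.getD_append_right zs ([d] ++ ys) 0 zs.length le_rfl]
        simp [List.getD]
      have hset : ∀ a : Int, ((zs ++ [d]) ++ ys).set zs.length a = (zs ++ [a]) ++ ys := by
        intro a
        rw [List.append_assoc, List.set_append_right _ _ le_rfl]
        simp
      simp only [up_array1_go, hget]
      by_cases h : d + 1 < 10
      · simp only [if_pos h, hset]
        simp [incR, if_pos h]
      · simp only [if_neg h, hset]
        have e1 : (zs ++ [(0:Int)]) ++ ys = zs ++ ((0:Int) :: ys) := by simp
        rw [e1, ih]
        simp [incR, if_neg h]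

theorem valR_append (xs : List Int) (d : Int) :
    valR (xs ++ [d]) = valR xs + d * 10 ^ xs.length := by
  induction xs with
  | nil => simp [valR]
  | cons a t ih => simp [valR, ih, pow_succ]; ring

theorem foldl_val (arr : List Int) (a : Int) :
    arr.foldl (fun acc d => acc * 10 + d) a = a * 10 ^ arr.length + valR arr.reverse := by
  induction arr generalizing a with
  | nil => simp [valR]
  | cons d t ih =>
      simp only [List.foldl_cons, ih, List.reverse_cons, valR_append, List.length_cons,
        List.length_reverse]
      ring

theorem valR_nonneg (rs : List Int) (h : ∀ d ∈ rs, 0 ≤ d) : 0 ≤ valR rs := by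
  induction rs with
  | nil => simp [valR]
  | cons d t ih =>
      have hd := h d (by simp)
      have ht := ih (fun x hx => h x (by simp [hx]))
      simp only [valR]; omega

theorem valR_zero (rs : List Int) (h : ∀ d ∈ rs, 0 ≤ d ∧ d ≤ 9) (hz : valR rs = 0) :
    rs = List.replicate rs.length 0 := by
  induction rs with
  | nil => simp
  | cons d t ih =>
      have hd := h d (by simp)
      have ht : 0 ≤ valR t := valR_nonneg t (fun x hx => (h x (by simp [hx])).1)
      simp only [valR] at hz
      have hd0 : d = 0 := by omega
      have ht0 : valR t = 0 := by omega
      have ht' := ih (fun x hx => h x (by simp [hx])) ht0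
      rw [hd0, List.length_cons, List.replicate_succ, ← ht']

theorem bDigits_spec (rs : List Int) (h : ∀ d ∈ rs, 0 ≤ d ∧ d ≤ 9) :
    bDigitsRev (valR rs) ++ List.replicate (rs.length - (bDigitsRev (valR rs)).length) 0 = rs := by
  induction rs with
  | nil =>
      show bDigitsRev (valR []) ++ _ = _
      rw [show valR [] = (0:Int) from rfl, bDigitsRev, dif_pos (by norm_num)]
      simp
  | cons d t ih =>
      have hd := h d (by simp)
      have ht : ∀ x ∈ t, 0 ≤ x ∧ x ≤ 9 := fun x hx => h x (by simp [hx])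
      have htn : 0 ≤ valR t := valR_nonneg t (fun x hx => (ht x hx).1)
      by_cases hm : valR (d :: t) ≤ 0
      · have hm' : d + 10 * valR t ≤ 0 := by simpa [valR] using hm
        have hd0 : d = 0 := by omega
        have ht0 : valR t = 0 := by omega
        rw [bDigitsRev, dif_pos hm]
        have := valR_zero t ht ht0
        simp only [List.nil_append, List.length_nil, Nat.sub_zero, List.length_cons,
          List.replicate_succ]
        rw [← this, hd0]
      · rw [bDigitsRev, dif_neg hm]
        have h10 : (0:Int) < 10 := by norm_num
        have hmod : PySem.Int.mod (valR (d :: t)) 10 = d := by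
          rw [PySem.Int.mod_eq_emod_of_pos h10]
          simp only [valR]; omega
        have hdiv : PySem.Int.floordiv (valR (d :: t)) 10 = valR t := by
          rw [PySem.Int.floordiv_eq_ediv_of_pos h10]
          simp only [valR]; omega
        rw [hmod, hdiv]
        simp only [List.length_cons, List.length_cons, Nat.succ_sub_succ]
        rw [List.cons_append, ih ht]

theorem bDigits_len_le (rs : List Int) (h : ∀ d ∈ rs, 0 ≤ d ∧ d ≤ 9) :
    (bDigitsRev (valR rs)).length ≤ rs.length := by
  have := congrArg List.length (bDigits_spec rs h)
  simp at this
  omega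

theorem incR_valid (rs : List Int) (h : ∀ d ∈ rs, 0 ≤ d ∧ d ≤ 9) :
    ∀ d ∈ incR rs, 0 ≤ d ∧ d ≤ 9 := by
  induction rs with
  | nil => simp [incR]
  | cons d t ih =>
      have hd := h d (by simp)
      simp only [incR]
      split
      · intro x hx
        rcases List.mem_cons.1 hx with h1 | h2
        · omega
        · exact h x (by simp [h2])
      · intro x hx
        rcases List.mem_cons.1 hx with h1 | h2
        · omega
        · exact ih (fun y hy => h y (by simp [hy])) x h2

theorem valR_incR (rs : List Int) (h : ∀ d ∈ rs, 0 ≤ d ∧ d ≤ 9) :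
    valR (incR rs) = valR rs + 1 := by
  induction rs with
  | nil => simp [incR, valR]
  | cons d t ih =>
      have hd := h d (by simp)
      simp only [incR]
      split
      · simp [valR]; ring
      · simp only [valR, ih (fun x hx => h x (by simp [hx]))]
        omega

theorem incR_length (rs : List Int) :
    (incR rs).length = rs.length ∨ incR rs = List.replicate rs.length 0 ++ [1] := by
  induction rs with
  | nil => right; simp [incR]
  | cons d t ih =>
      simp only [incR]
      split
      · left; simp
      · rcases ih with h1 | h2
        · left; simp [h1]
        · right; simp [h2, List.replicate_succ]

theorem bDigits_pow (k : Nat) : bDigitsRev (10 ^ k) = List.replicate k 0 ++ [1] := by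
  induction k with
  | zero =>
      rw [bDigitsRev, dif_neg (by norm_num)]
      have h10 : (0:Int) < 10 := by norm_num
      rw [PySem.Int.mod_eq_emod_of_pos h10, PySem.Int.floordiv_eq_ediv_of_pos h10]
      norm_num
      rw [bDigitsRev, dif_pos (by norm_num)]
  | succ k ih =>
      have hpos : (0:Int) < 10 ^ k := by positivity
      rw [bDigitsRev]
      have hne : ¬ (10:Int) ^ (k + 1) ≤ 0 := not_le.mpr (by positivity)
      rw [dif_neg hne]
      have h10 : (0:Int) < 10 := by norm_num
      have hmod : PySem.Int.mod ((10:Int) ^ (k + 1)) 10 = 0 := by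
        rw [PySem.Int.mod_eq_emod_of_pos h10, pow_succ]; omega
      have hdiv : PySem.Int.floordiv ((10:Int) ^ (k + 1)) 10 = 10 ^ k := by
        rw [PySem.Int.floordiv_eq_ediv_of_pos h10, pow_succ]
        rw [Int.mul_ediv_cancel _ (by norm_num)]
      rw [hmod, hdiv, ih, List.replicate_succ]
      simp

theorem valR_replicate_append_one (k : Nat) :
    valR (List.replicate k 0 ++ [1]) = 10 ^ k := by
  have h0 : valR (List.replicate k 0) = 0 := by
    induction k with
    | zero => simp [valR]
    | succ k ih => simp [List.replicate_succ, valR, ih]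
  rw [valR_append, h0]
  simp

-- guard equivalence: for nonempty arr, min<0 ∨ max>9 ↔ some element out of range
theorem guard_iff (arr : List Int) (hne : arr ≠ []) :
    ((PySem.List.min? arr (fun x => x)).getD 0 < 0 ∨
     (PySem.List.max? arr (fun x => x)).getD 0 > 9) ↔
    (arr.any (fun d => decide (d < 0) || decide (d > 9)) = true) := by
  obtain ⟨m, hm⟩ : ∃ m, PySem.List.min? arr (fun x => x) = some m := by
    cases h : PySem.List.min? arr (fun x => x) with
    | none => exact absurd ((PySem.List.min?_eq_none_iff arr (fun x => x)).1 h) hne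
    | some m => exact ⟨m, rfl⟩
  obtain ⟨M, hM⟩ : ∃ M, PySem.List.max? arr (fun x => x) = some M := by
    cases h : PySem.List.max? arr (fun x => x) with
    | none => exact absurd ((PySem.List.max?_eq_none_iff arr (fun x => x)).1 h) hne
    | some M => exact ⟨M, rfl⟩
  rw [hm, hM]
  simp only [Option.getD_some, List.any_eq_true, Bool.or_eq_true, decide_eq_true_eq]
  constructor
  · rintro (h1 | h2)
    · exact ⟨m, PySem.List.min?_mem hm, Or.inl h1⟩
    · exact ⟨M, PySem.List.max?_mem hM, Or.inr h2⟩
  · rintro ⟨d, hd, h1 | h2⟩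
    · exact Or.inl (lt_of_le_of_lt (PySem.List.min?_isMin hm d hd) h1)
    · exact Or.inr (lt_of_lt_of_le h2 (PySem.List.max?_isMax hM d hd))

theorem main_eq (arr : List Int) (hne : arr ≠ [])
    (hv : ∀ d ∈ arr, 0 ≤ d ∧ d ≤ 9) :
    some (up_array1_go arr arr.length) = up_array1_alt arr := by
  have hvr : ∀ d ∈ arr.reverse, 0 ≤ d ∧ d ≤ 9 := by
    intro d hd; exact hv d (List.mem_reverse.1 hd)
  have hguard : ¬ (arr = [] ∨ arr.any (fun d => decide (d < 0) || decide (d > 9)) = true) := by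
    rintro (h | h)
    · exact hne h
    · simp only [List.any_eq_true, Bool.or_eq_true, decide_eq_true_eq] at h
      obtain ⟨d, hd, hc⟩ := h
      have := hv d hd
      omega
  have hA : up_array1_go arr arr.length = (incR arr.reverse).reverse := by
    have := up_array1_go_eq arr []
    simpa using this
  unfold up_array1_alt
  rw [if_neg (by simpa using hguard)]
  have hfold : arr.foldl (fun acc d => acc * 10 + d) 0 = valR arr.reverse := by
    rw [foldl_val]; simp
  simp only [hfold, hA]
  have hvinc : ∀ d ∈ incR arr.reverse, 0 ≤ d ∧ d ≤ 9 := incR_valid _ hvr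
  have hval : valR (incR arr.reverse) = valR arr.reverse + 1 := valR_incR _ hvr
  rcases incR_length arr.reverse with hL | hOv
  · -- no overflow
    have hspec := bDigits_spec (incR arr.reverse) hvinc
    rw [hval] at hspec
    have hlen := bDigits_len_le (incR arr.reverse) hvinc
    rw [hval] at hlen
    rw [List.length_reverse] at hL
    have hle : (bDigitsRev (valR arr.reverse + 1)).reverse.length ≤ arr.length := by
      simp only [List.length_reverse]
      omega
    rw [if_pos hle]
    congr 1
    have : (incR arr.reverse).reverse =
        (bDigitsRev (valR arr.reverse + 1) ++
          List.replicate ((incR arr.reverse).length - (bDigitsRev (valR arr.reverse + 1)).length) 0).reverse := by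
      rw [hspec]
    rw [this]
    simp only [List.reverse_append, List.reverse_replicate, List.length_reverse, hL]
  · -- overflow: all nines
    have hlenO : (incR arr.reverse).length = arr.length + 1 := by
      rw [hOv]; simp
    have hvalO : valR arr.reverse + 1 = 10 ^ arr.length := by
      rw [← hval, hOv, valR_replicate_append_one]
      simp
    rw [hvalO, bDigits_pow]
    simp only [List.reverse_append, List.reverse_replicate, List.reverse_cons,
      List.reverse_nil, List.nil_append, List.singleton_append, List.length_cons,
      List.length_replicate]
    rw [if_neg (by omega)]
    rw [hOv]
    simp

-- ===== VERDICT (by name: the statement is the Claim_ definition above) =====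
theorem up_array1_spec : Claim_equal_up_array1 := by
  intro arr _
  unfold Spec_up_array1 up_array1
  by_cases hne : arr = []
  · subst hne
    simp [up_array1_alt]
  · rw [if_neg hne]
    by_cases hg : (PySem.List.min? arr (fun x => x)).getD 0 < 0 ∨
        (PySem.List.max? arr (fun x => x)).getD 0 > 9
    · rw [if_pos hg]
      unfold up_array1_alt
      rw [if_pos (Or.inr ((guard_iff arr hne).1 hg))]
    · rw [if_neg hg]
      have hv : ∀ d ∈ arr, 0 ≤ d ∧ d ≤ 9 := by
        intro d hd
        by_contra hc
        exact hg ((guard_iff arr hne).2 (by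
          simp only [List.any_eq_true, Bool.or_eq_true, decide_eq_true_eq]
          exact ⟨d, hd, by omega⟩))
      exact main_eq arr hne hv
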